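-- pv_equiv track=rewrite | github.com/cflorka/Arkham | Populate MythosDeck.py | addShapeToEach
-- ===== SOURCE A (Python) =====
-- def addShapeToEach(shapeList):
-- 	output = ""
-- 	skinny = "".join(shapeList.split()) #removes whitespace
-- 	if skinny:
-- 		shapeListArr = skinny.split(",")
-- 		arr = ["Shape." + shape for shape in shapeListArr]
-- 		output = ", ".join(arr)
-- 	return output
-- ===== SOURCE B (Python) =====
-- def addShapeToEach(shapeList):
-- 	out = []
-- 	for ch in shapeList:
-- 		if ch.isspace():
-- 			continue
-- 		out.append(", Shape." if ch == "," else ch)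
-- 	return "Shape." + "".join(out) if out else ""
-- ===== Notes on version B (the rewrite author's own statement) =====
-- stated objective: simpler
-- what changed: Replaces the split-on-whitespace/join, split-on-comma, comprehension-prefix, rejoin pipeline by a single character-level pass that skips whitespace and emits the separator-plus-prefix piece for each comma, adding the prefix once at the end.
import Mathlib
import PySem

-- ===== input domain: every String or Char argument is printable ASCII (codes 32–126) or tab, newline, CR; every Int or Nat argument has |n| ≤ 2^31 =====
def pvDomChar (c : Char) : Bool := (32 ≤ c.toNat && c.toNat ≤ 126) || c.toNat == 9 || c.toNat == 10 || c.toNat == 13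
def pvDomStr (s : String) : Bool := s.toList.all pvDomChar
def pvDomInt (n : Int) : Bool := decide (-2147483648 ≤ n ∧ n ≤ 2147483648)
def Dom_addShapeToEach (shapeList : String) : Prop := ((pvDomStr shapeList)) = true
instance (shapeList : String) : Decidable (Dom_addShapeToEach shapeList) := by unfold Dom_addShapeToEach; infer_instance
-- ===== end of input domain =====

-- B does the same task in one character pass (skip whitespace, expand each comma to separator-plus-prefix, prefix once at the end): simpler, no intermediate token lists.

-- ===== PORT A =====
-- literal port of A at the code-point (List Char) level; string truthiness `if skinny:` is non-emptiness
def addShapeToEach (shapeList : String) : String :=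
  let output : List Char := []
  let skinny : List Char := PySem.Chars.join [] (PySem.Chars.split₀ shapeList.toList)
  if skinny ≠ [] then
    let shapeListArr := PySem.Chars.splitOn skinny ",".toList
    let arr := shapeListArr.map (fun shape => "Shape.".toList ++ shape)
    String.mk (PySem.Chars.join ", ".toList arr)
  else String.mk output

-- ===== PORT B =====
-- literal port of B: one fold over the characters accumulating the emitted pieces
def addShapeToEach_alt (shapeList : String) : String :=
  let out : List (List Char) :=
    shapeList.toList.foldl
      (fun acc ch =>
        if PySem.Chars.isspace ch then acc
        else acc ++ [if ch == ',' then ", Shape.".toList else [ch]]) []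
  if out ≠ [] then String.mk ("Shape.".toList ++ PySem.Chars.join [] out) else ""

-- ===== PRECONDITION & SPEC =====
def Spec_addShapeToEach (shapeList : String) (out : String) : Prop := out = addShapeToEach_alt shapeList
instance (shapeList : String) (out : String) : Decidable (Spec_addShapeToEach shapeList out) := by unfold Spec_addShapeToEach; infer_instance

-- ===== CLAIM (what is proved, stated in full; the proofs are below) =====
def Claim_equal_addShapeToEach : Prop := ∀ (shapeList : String), Dom_addShapeToEach shapeList → Spec_addShapeToEach shapeList (addShapeToEach shapeList)

-- ===== LEMMAS AND PROOFS =====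

-- join with empty separator is concatenation
theorem pv_join_nil_flatten (ps : List (List Char)) : PySem.Chars.join [] ps = ps.flatten := by
  induction ps with
  | nil => simp [PySem.Chars.join_nil]
  | cons h t ih =>
    cases t with
    | nil => simp [PySem.Chars.join_singleton]
    | cons b r => simp [PySem.Chars.join_cons_cons, ih]

-- concatenating the words of str.split() is exactly removing the whitespace characters
theorem pv_split₀_flatten_go (l : List Char) :
    ∀ (cur : List Char) (acc : List (List Char)),
      (PySem.Chars.split₀.go l cur acc).flatten =
        acc.reverse.flatten ++ cur.reverse ++ l.filter (fun c => !PySem.Chars.isspace c) := by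
  induction l with
  | nil =>
    intro cur acc
    by_cases h : cur = []
    · subst h; simp [PySem.Chars.split₀.go]
    · simp [PySem.Chars.split₀.go, List.isEmpty_eq_false_iff.mpr h, h]
  | cons c rest ih =>
    intro cur acc
    by_cases hs : PySem.Chars.isspace c
    · by_cases h : cur = []
      · subst h; simp [PySem.Chars.split₀.go, hs, ih]
      · simp [PySem.Chars.split₀.go, hs, List.isEmpty_eq_false_iff.mpr h, ih]
    · simp [PySem.Chars.split₀.go, hs, ih]

theorem pv_split₀_flatten (l : List Char) :
    PySem.Chars.join [] (PySem.Chars.split₀ l) = l.filter (fun c => !PySem.Chars.isspace c) := by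
  simp [pv_join_nil_flatten, PySem.Chars.split₀, pv_split₀_flatten_go]

-- a simple specification of splitting on the single character ','
def pvSplitC : List Char → List (List Char)
  | [] => [[]]
  | c :: rest =>
    if c = ',' then [] :: pvSplitC rest
    else
      match pvSplitC rest with
      | [] => [[c]]
      | h :: t => (c :: h) :: t

theorem pvSplitC_ne_nil (l : List Char) : pvSplitC l ≠ [] := by
  cases l with
  | nil => simp [pvSplitC]
  | cons c rest =>
    simp only [pvSplitC]
    split <;> try simp
    split <;> simp

theorem pv_splitOn_go (fuel : Nat) :
    ∀ (l cur : List Char) (acc : List (List Char)), l.length < fuel →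
      PySem.Chars.splitOn.go [','] fuel l cur acc =
        acc.reverse ++
          (match pvSplitC l with
            | [] => []
            | h :: t => (cur.reverse ++ h) :: t) := by
  induction fuel with
  | zero => intro l cur acc h; omega
  | succ f ih =>
    intro l cur acc h
    cases l with
    | nil => simp [PySem.Chars.splitOn.go, pvSplitC]
    | cons c rest =>
      by_cases hc : c = ','
      · subst hc
        have hpre : List.isPrefixOf [','] (',' :: rest) = true := by simp [List.isPrefixOf]
        rw [PySem.Chars.splitOn.go, if_pos hpre,
          show List.drop [','].length (',' :: rest) = rest from rfl]
        simp only [List.length_cons] at h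
        rw [ih rest [] (cur.reverse :: acc) (by omega)]
        rcases hsp : pvSplitC rest with _ | ⟨hh, tt⟩
        · exact absurd hsp (pvSplitC_ne_nil rest)
        · simp [pvSplitC, hsp]
      · have hpre : List.isPrefixOf [','] (c :: rest) = false := by
          simp [List.isPrefixOf]; exact fun hcc => hc hcc.symm
        rw [PySem.Chars.splitOn.go, if_neg (by simp [hpre])]
        simp only [List.length_cons] at h
        rw [ih rest (c :: cur) acc (by omega)]
        rcases hsp : pvSplitC rest with _ | ⟨hh, tt⟩
        · exact absurd hsp (pvSplitC_ne_nil rest)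
        · simp [pvSplitC, hc, hsp]

theorem pv_splitOn_eq_pvSplitC (l : List Char) :
    PySem.Chars.splitOn l [','] = pvSplitC l := by
  rw [PySem.Chars.splitOn, pv_splitOn_go (l.length + 1) l [] [] (by omega)]
  rcases hsp : pvSplitC l with _ | ⟨hh, tt⟩
  · exact absurd hsp (pvSplitC_ne_nil l)
  · simp

-- piece emitted per non-whitespace character
def pvPiece (c : Char) : List Char := if c == ',' then ", Shape.".toList else [c]

-- the head word of a join can be split off an append
theorem pv_join_head (sep x y : List Char) (r : List (List Char)) :
    PySem.Chars.join sep ((x ++ y) :: r) = x ++ PySem.Chars.join sep (y :: r) := by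
  cases r with
  | nil => simp [PySem.Chars.join_singleton]
  | cons b t => simp [PySem.Chars.join_cons_cons]

-- A's join-of-prefixed-tokens equals the flat per-character emission with one leading "Shape."
theorem pv_join_shape (cs : List Char) :
    PySem.Chars.join ", ".toList ((pvSplitC cs).map (fun t => "Shape.".toList ++ t)) =
      "Shape.".toList ++ cs.flatMap pvPiece := by
  induction cs with
  | nil => simp [pvSplitC, PySem.Chars.join_singleton]
  | cons c rest ih =>
    rcases hsp : pvSplitC rest with _ | ⟨hh, tt⟩
    · exact absurd hsp (pvSplitC_ne_nil rest)
    rw [hsp] at ih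
    have hmap : (hh :: tt).map (fun t => "Shape.".toList ++ t) =
        ("Shape.".toList ++ hh) :: tt.map (fun t => "Shape.".toList ++ t) := rfl
    rw [hmap, pv_join_head] at ih
    have hJ := List.append_cancel_left ih
    by_cases hc : c = ','
    · subst hc
      have e1 : pvSplitC (',' :: rest) = [] :: hh :: tt := by simp [pvSplitC, hsp]
      rw [e1,
        show ([] :: hh :: tt).map (fun t => "Shape.".toList ++ t) =
          "Shape.".toList :: ("Shape.".toList ++ hh) :: tt.map (fun t => "Shape.".toList ++ t)
          by simp,
        PySem.Chars.join_cons_cons, pv_join_head, hJ,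
        show List.flatMap pvPiece (',' :: rest) = (", ".toList ++ "Shape.".toList) ++ List.flatMap pvPiece rest
          by simp [pvPiece]]
      simp
    · have e1 : pvSplitC (c :: rest) = (c :: hh) :: tt := by simp [pvSplitC, hc, hsp]
      rw [e1,
        show ((c :: hh) :: tt).map (fun t => "Shape.".toList ++ t) =
          (("Shape.".toList ++ [c]) ++ hh) :: tt.map (fun t => "Shape.".toList ++ t)
          by simp,
        pv_join_head, hJ]
      simp [pvPiece, hc]

-- B's fold collects exactly the pieces of the non-whitespace characters
theorem pv_fold_pieces (l : List Char) :
    l.foldl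
      (fun acc ch =>
        if PySem.Chars.isspace ch then acc
        else acc ++ [if ch == ',' then ", Shape.".toList else [ch]]) [] =
      (l.filter (fun c => !PySem.Chars.isspace c)).map pvPiece := by
  have hfun : (fun (acc : List (List Char)) ch =>
        if PySem.Chars.isspace ch then acc
        else acc ++ [if ch == ',' then ", Shape.".toList else [ch]]) =
      (fun acc ch => if (!PySem.Chars.isspace ch) then acc ++ [pvPiece ch] else acc) := by
    funext acc ch
    by_cases h : PySem.Chars.isspace ch <;> simp [h, pvPiece]
  rw [hfun, PySem.List.foldl_append_if]
  simp

-- ===== VERDICT (by name: the statement is the Claim_ definition above) =====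
theorem addShapeToEach_spec : Claim_equal_addShapeToEach := by
  intro s _
  unfold Spec_addShapeToEach addShapeToEach addShapeToEach_alt
  simp only [pv_split₀_flatten, pv_fold_pieces]
  set sk := s.toList.filter (fun c => !PySem.Chars.isspace c) with hsk
  by_cases h : sk = []
  · rw [if_neg (by simp [h]), if_neg (by simp [h])]; rfl
  · rw [if_pos h, if_pos (by simp [h])]
    rw [show (",".toList) = [','] from rfl, pv_splitOn_eq_pvSplitC, pv_join_shape, pv_join_nil_flatten]
    simp [List.flatMap]
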